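-- pv_equiv track=rewrite | github.com/singhrama/Insurers_TIC | Humana_Code/option_util.py | force_increasing_x
-- ===== SOURCE A (Python) =====
-- def force_increasing_x(x, y):
--     N = len(x)
--     if len(x) < 2:
--         return x, y
--     xx, yy = [x[0]], [y[0]]
--     for ii in range(1, N):
--         if x[ii] > xx[-1]:
--             xx.append(x[ii])
--             yy.append(y[ii])
--     return xx, yy
-- ===== SOURCE B (Python) =====
-- def force_increasing_x(x, y):
--     if len(x) < 2:
--         return x, y
--     # pass 1: prefix maxima of x
--     pmax = []
--     m = x[0]
--     for v in x:
--         m = m if m > v else v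
--         pmax.append(m)
--     # pass 2: keep index 0 and every index where the prefix max strictly increased
--     keep = [0] + [i for i in range(1, len(x)) if pmax[i] > pmax[i - 1]]
--     return [x[i] for i in keep], [y[i] for i in keep]
-- ===== Notes on version B (the rewrite author's own statement) =====
-- stated objective: alternative
-- what changed: Replaces A's single appending scan that compares each x against the last kept element by a two-pass table-then-select shape: first build the prefix-maximum sequence of x, then keep index 0 plus every index where the prefix max strictly increased, selecting the paired y positionally.
import Mathlib
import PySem

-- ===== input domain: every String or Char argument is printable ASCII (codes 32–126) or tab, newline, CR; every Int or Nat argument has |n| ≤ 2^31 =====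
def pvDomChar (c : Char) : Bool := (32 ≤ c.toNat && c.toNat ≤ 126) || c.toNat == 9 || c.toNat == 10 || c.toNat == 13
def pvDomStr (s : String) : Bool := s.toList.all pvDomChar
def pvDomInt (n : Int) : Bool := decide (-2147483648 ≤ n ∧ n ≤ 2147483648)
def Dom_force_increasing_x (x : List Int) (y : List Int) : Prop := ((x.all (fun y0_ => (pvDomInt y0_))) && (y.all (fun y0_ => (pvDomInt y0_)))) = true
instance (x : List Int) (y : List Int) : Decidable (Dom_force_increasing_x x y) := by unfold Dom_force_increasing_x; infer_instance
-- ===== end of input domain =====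

-- B replaces A's single appending scan by a prefix-max table pass plus an index-selection pass (alternative decomposition, same cost).

-- ===== PORT A =====
-- range(1, N) is ported as List.range' 1 (N - 1); list indexing via getD (all indices are in range under Pre_).
def force_increasing_x (x : List Int) (y : List Int) : List Int × List Int :=
  if x.length < 2 then (x, y)
  else
    (List.range' 1 (x.length - 1)).foldl
      (fun (s : List Int × List Int) ii =>
        if x.getD ii 0 > s.1.getLast! then (s.1 ++ [x.getD ii 0], s.2 ++ [y.getD ii 0])
        else s)
      ([x.getD 0 0], [y.getD 0 0])

-- ===== PORT B =====
-- first pass: prefix maxima of x; second pass: keep index 0 and indices where the prefix max strictly increased.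
def force_increasing_x_alt (x : List Int) (y : List Int) : List Int × List Int :=
  if x.length < 2 then (x, y)
  else
    let pmax := (x.foldl
      (fun (s : Int × List Int) v =>
        let m := if s.1 > v then s.1 else v
        (m, s.2 ++ [m]))
      (x.getD 0 0, [])).2
    let keep := 0 :: (List.range' 1 (x.length - 1)).filter
      (fun i => pmax.getD i 0 > pmax.getD (i - 1) 0)
    (keep.map (fun i => x.getD i 0), keep.map (fun i => y.getD i 0))

-- ===== PRECONDITION & SPEC =====
-- Pre_ excludes exactly the inputs on which A raises IndexError: len(x) ≥ 2 with y empty,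
-- or a kept index (i = 0 or x[i] strictly above all earlier x) out of range for y.
def Pre_force_increasing_x (x : List Int) (y : List Int) : Prop :=
  2 ≤ x.length →
    (y ≠ [] ∧ ∀ i ∈ List.range x.length, 1 ≤ i →
      (∀ j ∈ List.range i, x.getD j 0 < x.getD i 0) → i < y.length)
instance (x : List Int) (y : List Int) : Decidable (Pre_force_increasing_x x y) := by
  unfold Pre_force_increasing_x; infer_instance
def pvWitness_force_increasing_x : List Int × List Int := ([1, 3, 2], [7, 8, 9])
def Spec_force_increasing_x (x : List Int) (y : List Int) (out : List Int × List Int) : Prop := out = force_increasing_x_alt x y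
instance (x : List Int) (y : List Int) (out : List Int × List Int) : Decidable (Spec_force_increasing_x x y out) := by unfold Spec_force_increasing_x; infer_instance

-- ===== CLAIM (what is proved, stated in full; the proofs are below) =====
def Claim_equal_force_increasing_x : Prop := ∀ (x : List Int) (y : List Int), Dom_force_increasing_x x y → Pre_force_increasing_x x y → Spec_force_increasing_x x y (force_increasing_x x y)

-- ===== LEMMAS AND PROOFS =====

-- prefix max of x[0..i] seeded with m
def pvPmax (m : Int) (xs : List Int) (i : Nat) : Int :=
  (xs.take (i + 1)).foldl max m

-- the list B's first pass builds
def pvScan (m : Int) : List Int → List Int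
  | [] => []
  | v :: t => max m v :: pvScan (max m v) t

lemma pvIfMax (m v : Int) : (if m > v then m else v) = max m v := by
  by_cases h : m > v
  · rw [if_pos h, max_eq_left h.le]
  · rw [if_neg h, max_eq_right (not_lt.mp h)]

lemma pvScan_spec (xs : List Int) (m : Int) (acc : List Int) :
    xs.foldl
      (fun (s : Int × List Int) v =>
        let m := if s.1 > v then s.1 else v
        (m, s.2 ++ [m])) (m, acc)
      = (xs.foldl max m, acc ++ pvScan m xs) := by
  induction xs generalizing m acc with
  | nil => simp [pvScan]
  | cons v t ih =>
      simp only [List.foldl_cons, pvIfMax]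
      simp only [pvIfMax] at ih
      rw [ih]
      simp [pvScan]

lemma pvScan_getD (xs : List Int) (m : Int) (i : Nat) (h : i < xs.length) :
    (pvScan m xs).getD i 0 = pvPmax m xs i := by
  induction xs generalizing m i with
  | nil => simp at h
  | cons v t ih =>
      cases i with
      | zero => simp [pvScan, pvPmax]
      | succ i =>
          simp only [pvScan, List.getD_cons_succ]
          rw [ih (max m v) i (by simpa using h)]
          simp [pvPmax, List.foldl_cons]

lemma pvPmax_succ (xs : List Int) (m : Int) (i : Nat) (h : i + 1 < xs.length) :
    pvPmax m xs (i + 1) = max (pvPmax m xs i) (xs.getD (i + 1) 0) := by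
  unfold pvPmax
  conv_lhs => rw [List.take_add_one]
  rw [List.getElem?_eq_getElem h, List.getD_eq_getElem _ _ h, List.foldl_append]
  simp

lemma pvGetLast_concat (l : List Int) (a : Int) : (l ++ [a]).getLast! = a := by
  induction l with
  | nil => rfl
  | cons h t ih => simp_all [List.getLast!]

lemma pvPmax_zero (x : List Int) (hx : 0 < x.length) :
    pvPmax (x.getD 0 0) x 0 = x.getD 0 0 := by
  cases x with
  | nil => simp at hx
  | cons a t => simp [pvPmax]

-- the last kept x of A's loop state is the prefix max of x[0..n]
lemma pvLast (x y : List Int) (hx : 0 < x.length) (n : Nat) (hn : n < x.length) :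
    ((List.range' 1 n).foldl
      (fun (s : List Int × List Int) ii =>
        if x.getD ii 0 > s.1.getLast! then (s.1 ++ [x.getD ii 0], s.2 ++ [y.getD ii 0])
        else s)
      ([x.getD 0 0], [y.getD 0 0])).1.getLast! = pvPmax (x.getD 0 0) x n := by
  induction n with
  | zero =>
      rw [pvPmax_zero x hx]; rfl
  | succ n ih =>
      have hn' : n < x.length := Nat.lt_of_succ_lt hn
      rw [List.range'_1_concat, List.foldl_append, List.foldl_cons, List.foldl_nil,
        Nat.add_comm 1 n]
      rw [ih hn']
      have hpm : pvPmax (x.getD 0 0) x (n + 1)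
          = max (pvPmax (x.getD 0 0) x n) (x.getD (n + 1) 0) := pvPmax_succ x _ n hn
      by_cases hc : x.getD (n + 1) 0 > pvPmax (x.getD 0 0) x n
      · rw [if_pos hc]
        rw [pvGetLast_concat, hpm, max_eq_right hc.le]
      · rw [if_neg hc, ih hn', hpm, max_eq_left (not_lt.mp hc)]

-- A's loop state equals B's selection over the same index range
lemma pvEq (x y : List Int) (hx : 0 < x.length) (n : Nat) (hn : n < x.length) :
    (List.range' 1 n).foldl
      (fun (s : List Int × List Int) ii =>
        if x.getD ii 0 > s.1.getLast! then (s.1 ++ [x.getD ii 0], s.2 ++ [y.getD ii 0])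
        else s)
      ([x.getD 0 0], [y.getD 0 0])
      = ((0 :: (List.range' 1 n).filter
            (fun i => x.getD i 0 > pvPmax (x.getD 0 0) x (i - 1))).map (fun i => x.getD i 0),
         (0 :: (List.range' 1 n).filter
            (fun i => x.getD i 0 > pvPmax (x.getD 0 0) x (i - 1))).map (fun i => y.getD i 0)) := by
  induction n with
  | zero => simp
  | succ n ih =>
      have hn' : n < x.length := Nat.lt_of_succ_lt hn
      have hlast := pvLast x y hx n hn'
      rw [ih hn'] at hlast
      rw [List.range'_1_concat, List.foldl_append, List.foldl_cons, List.foldl_nil,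
        List.filter_append, Nat.add_comm 1 n]
      rw [ih hn', hlast]
      by_cases hc : x.getD (n + 1) 0 > pvPmax (x.getD 0 0) x n
      · have hfil : List.filter (fun i => decide (x.getD i 0 > pvPmax (x.getD 0 0) x (i - 1)))
            [n + 1] = [n + 1] := by simp; simpa using hc
        rw [if_pos hc, hfil]
        simp [List.map_append]
      · have hfil : List.filter (fun i => decide (x.getD i 0 > pvPmax (x.getD 0 0) x (i - 1)))
            [n + 1] = [] := by simp; simpa using not_lt.mp hc
        rw [if_neg hc, hfil]
        simp

-- ===== VERDICT (by name: the statement is the Claim_ definition above) =====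
theorem force_increasing_x_spec : Claim_equal_force_increasing_x := by
  intro x y _ _
  unfold Spec_force_increasing_x force_increasing_x force_increasing_x_alt
  by_cases h2 : x.length < 2
  · simp [h2]
  · rw [if_neg h2, if_neg h2]
    have hx : 0 < x.length := by omega
    have hn : x.length - 1 < x.length := by omega
    rw [pvEq x y hx (x.length - 1) hn]
    have hpm := pvScan_spec x (x.getD 0 0) []
    have hfilter : (List.range' 1 (x.length - 1)).filter
        (fun i => ((x.foldl
          (fun (s : Int × List Int) v =>
            let m := if s.1 > v then s.1 else v
            (m, s.2 ++ [m])) (x.getD 0 0, [])).2.getD i 0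
          > (x.foldl
          (fun (s : Int × List Int) v =>
            let m := if s.1 > v then s.1 else v
            (m, s.2 ++ [m])) (x.getD 0 0, [])).2.getD (i - 1) 0))
        = (List.range' 1 (x.length - 1)).filter
        (fun i => x.getD i 0 > pvPmax (x.getD 0 0) x (i - 1)) := by
      apply List.filter_congr
      intro i hi
      have hmem := List.mem_range'_1.mp hi
      have h1i : 1 ≤ i := hmem.1
      have hiN : i < x.length := by omega
      have hi1N : i - 1 < x.length := by omega
      simp only [hpm, List.nil_append]
      simp only [pvScan_getD x _ i hiN, pvScan_getD x _ (i - 1) hi1N]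
      have hstep : pvPmax (x.getD 0 0) x i
          = max (pvPmax (x.getD 0 0) x (i - 1)) (x.getD i 0) := by
        have hi' : i - 1 + 1 = i := by omega
        rw [← hi']; exact pvPmax_succ x _ (i - 1) (by omega)
      rw [hstep]
      simp
    rw [← hfilter]
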